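-- pv_equiv track=rewrite | github.com/AmirHosein-Gharaati/Competitive-programming | Codeforces/Given Length and Sum of Digits....py | f
-- ===== SOURCE A (Python) =====
-- def f(m,s):
--     lis = [-1,-1]
--     if m == 1 and s == 0:
--         return [0,0]
--     if not 1<=s<=m*9:
--         return lis
--     mini = [0]*m
--     maxi = [0]*m
--     s1 = s
--     i1 = m-1
--     s2 = s
--     i2 = 0
--     while(s1!=0):
--         if mini[i1] == 9:
--             i1 -=1
--         if s1 == 1:
--             if mini[0] == 0:
--                 mini[0] += 1
--                 break
--             else:
--                 mini[i1] += 1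
--                 break
--         mini[i1] += 1
--         s1 -= 1
--     while(s2!=0):
--         if maxi[i2] == 9:
--             i2 +=1
--         maxi[i2] +=1
--         s2 -=1
--     mini = list(map(str,mini))
--     maxi = list(map(str,maxi))
--     return [int(''.join(mini)),int(''.join(maxi))]
-- ===== SOURCE B (Python) =====
-- def _greedy(n, t):
--     # distribute t over n digit slots, greedily 9 at a time; return digits and leftover
--     out = []
--     for _ in range(n):
--         d = min(9, t)
--         out.append(d)
--         t -= d
--     return out, t
--
-- def f(m, s):
--     if m == 1 and s == 0:
--         return [0, 0]
--     if not 1 <= s <= m * 9: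
--         return [-1, -1]
--     maxi, _ = _greedy(m, s)
--     # minimum: reserve 1 for the leading digit, fill the rest from the right
--     rts, t = _greedy(m - 1, s - 1)
--     mini = [1 + t] + rts[::-1]
--     return [int(''.join(map(str, mini))), int(''.join(map(str, maxi)))]
-- ===== Notes on version B (the rewrite author's own statement) =====
-- stated objective: simpler
-- what changed: A places the digit sum one unit at a time in two stateful while loops with moving pointers; B computes each digit directly in a single greedy pass over the digit positions (min(9, remaining) per slot, with 1 reserved for the leading digit of the minimum).
import Mathlib
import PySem

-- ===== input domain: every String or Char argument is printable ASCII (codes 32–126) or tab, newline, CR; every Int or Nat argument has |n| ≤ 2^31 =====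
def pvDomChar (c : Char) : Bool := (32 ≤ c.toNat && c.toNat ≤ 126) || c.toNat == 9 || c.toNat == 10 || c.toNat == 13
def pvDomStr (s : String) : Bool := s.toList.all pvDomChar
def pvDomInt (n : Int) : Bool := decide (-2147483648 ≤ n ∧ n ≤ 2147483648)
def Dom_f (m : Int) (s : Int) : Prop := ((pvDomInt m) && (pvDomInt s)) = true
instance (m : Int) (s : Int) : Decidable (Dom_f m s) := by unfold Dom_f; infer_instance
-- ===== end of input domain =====

-- B builds each digit list in one greedy pass over the m positions (min(9, remaining) per
-- slot) instead of A's unit-by-unit while loops with moving pointers: simpler and structurally different.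

-- ===== PORT A =====

-- xs[i] += 1  (index always in range in every state A's loops reach under its guard)
def pyIncrAt (xs : List Int) (i : Int) : List Int :=
  PySem.List.pySetD xs i (PySem.List.pyGetD xs i 0 + 1)

-- int(''.join(map(str, xs))); under A's guard the string is nonempty digits, so ofStr? succeeds
def joinInt (xs : List Int) : Int :=
  (PySem.Int.ofStr? (PySem.Str.join "" (xs.map PySem.Int.toStr))).getD 0

-- A's first while loop; the fuel is s1 itself (each non-break iteration decrements s1 by 1)
def minLoop : Nat → List Int → Int → List Int
  | 0, mini, _ => mini
  | Nat.succ s1, mini, i1 =>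
    let i1' := if PySem.List.pyGetD mini i1 0 = 9 then i1 - 1 else i1
    if s1 + 1 = 1 then
      if PySem.List.pyGetD mini 0 0 = 0 then pyIncrAt mini 0
      else pyIncrAt mini i1'
    else minLoop s1 (pyIncrAt mini i1') i1'

-- A's second while loop; fuel is s2
def maxLoop : Nat → List Int → Int → List Int
  | 0, maxi, _ => maxi
  | Nat.succ s2, maxi, i2 =>
    let i2' := if PySem.List.pyGetD maxi i2 0 = 9 then i2 + 1 else i2
    maxLoop s2 (pyIncrAt maxi i2') i2'

def f (m : Int) (s : Int) : List Int :=
  if m = 1 ∧ s = 0 then [0, 0]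
  else if ¬ (1 ≤ s ∧ s ≤ m * 9) then [-1, -1]
  else
    let mini := minLoop s.toNat (List.replicate m.toNat 0) (m - 1)
    let maxi := maxLoop s.toNat (List.replicate m.toNat 0) 0
    [joinInt mini, joinInt maxi]

-- ===== PORT B =====

-- Source B's _greedy(n, t): one pass over the n slots, each takes min(9, t)
def greedyB (n : Nat) (t : Int) : List Int × Int :=
  (List.range n).foldl (fun ar _ => (ar.1 ++ [min 9 ar.2], ar.2 - min 9 ar.2)) ([], t)

def f_alt (m : Int) (s : Int) : List Int :=
  if m = 1 ∧ s = 0 then [0, 0]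
  else if ¬ (1 ≤ s ∧ s ≤ m * 9) then [-1, -1]
  else
    let maxi := (greedyB m.toNat s).1
    let q := greedyB (m - 1).toNat (s - 1)
    let mini := (1 + q.2) :: q.1.reverse
    [joinInt mini, joinInt maxi]

-- ===== PRECONDITION & SPEC =====
def Spec_f (m : Int) (s : Int) (out : List Int) : Prop := out = f_alt m s
instance (m : Int) (s : Int) (out : List Int) : Decidable (Spec_f m s out) := by unfold Spec_f; infer_instance

-- ===== CLAIM (what is proved, stated in full; the proofs are below) =====
def Claim_equal_f : Prop := ∀ (m : Int) (s : Int), Dom_f m s → Spec_f m s (f m s)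

-- ===== LEMMAS AND PROOFS =====

-- closed form of the max-digit list: position j holds clamp(t - 9j, 0, 9)
def Mcf (n : Nat) (t : Int) : List Int :=
  (List.range n).map (fun (j : Nat) => max 0 (min 9 (t - 9 * (j : Int))))

-- closed form of the min loop's intermediate list (greedy from the right)
def Rcf (n : Nat) (t : Int) : List Int :=
  (List.range n).map (fun (j : Nat) => max 0 (min 9 (t - 9 * ((n : Int) - 1 - (j : Int)))))

-- closed form of the finished min-digit list
def Fcf (n : Nat) (s : Int) : List Int :=
  (1 + max 0 (s - 1 - 9 * ((n : Int) - 1))) :: (Mcf (n - 1) (s - 1)).reverse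

theorem length_Mcf (n : Nat) (t : Int) : (Mcf n t).length = n := by
  simp [Mcf]

theorem length_Rcf (n : Nat) (t : Int) : (Rcf n t).length = n := by
  simp [Rcf]

theorem map_range_pyGetD (g : Nat → Int) (n : Nat) (i : Int) (h0 : 0 ≤ i) (h : i < n) :
    PySem.List.pyGetD ((List.range n).map g) i 0 = g i.toNat := by
  rw [PySem.List.pyGetD_eq_getElem _ 0 h0 (by simpa using h)]
  simp

theorem map_range_set (g g' : Nat → Int) (n : Nat) (i : Int) (h0 : 0 ≤ i) (h : i < n)
    (hi : g' i.toNat = g i.toNat + 1) (hj : ∀ j : Nat, j < n → j ≠ i.toNat → g' j = g j) :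
    (List.range n).map g' = PySem.List.pySetD ((List.range n).map g) i (PySem.List.pyGetD ((List.range n).map g) i 0 + 1) := by
  rw [map_range_pyGetD g n i h0 h, PySem.List.pySetD_of_nonneg _ _ h0]
  apply List.ext_getElem
  · simp
  · intro k hk hk'
    simp only [List.getElem_map, List.getElem_range, List.getElem_set]
    by_cases hki : k = i.toNat
    · simp [hki, hi]
    · have hne : i.toNat ≠ k := fun h' => hki h'.symm
      simp [hne, hj k (by simpa using hk) hki]

theorem Mcf_get (n : Nat) (t i : Int) (h0 : 0 ≤ i) (h : i < n) :
    PySem.List.pyGetD (Mcf n t) i 0 = max 0 (min 9 (t - 9 * i)) := by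
  unfold Mcf
  rw [map_range_pyGetD _ n i h0 h]
  congr 2
  omega

theorem Rcf_get (n : Nat) (t i : Int) (h0 : 0 ≤ i) (h : i < n) :
    PySem.List.pyGetD (Rcf n t) i 0 = max 0 (min 9 (t - 9 * ((n : Int) - 1 - i))) := by
  unfold Rcf
  rw [map_range_pyGetD _ n i h0 h]
  congr 3
  omega

theorem Mcf_succ_set (n : Nat) (t i : Int) (h0 : 0 ≤ i) (h : i < n)
    (h1 : 9 * i ≤ t) (h2 : t ≤ 9 * i + 8) :
    Mcf n (t + 1) = pyIncrAt (Mcf n t) i := by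
  unfold Mcf pyIncrAt
  apply map_range_set _ _ n i h0 h
  · have hcast : ((i.toNat : Int)) = i := by omega
    rw [hcast]; omega
  · intro j hjn hji
    have hne : ((j : Int)) ≠ i := by omega
    rcases lt_or_gt_of_ne hne with hlt | hgt
    · omega
    · omega

theorem Rcf_succ_set (n : Nat) (t i : Int) (h0 : 0 ≤ i) (h : i ≤ (n : Int) - 1)
    (h1 : 9 * ((n : Int) - 1 - i) ≤ t) (h2 : t ≤ 9 * ((n : Int) - 1 - i) + 8) :
    Rcf n (t + 1) = pyIncrAt (Rcf n t) i := by
  unfold Rcf pyIncrAt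
  apply map_range_set _ _ n i h0 (by omega)
  · have hcast : ((i.toNat : Int)) = i := by omega
    rw [hcast]; omega
  · intro j hjn hji
    have hne : ((j : Int)) ≠ i := by omega
    rcases lt_or_gt_of_ne hne with hlt | hgt
    · omega
    · omega

theorem Mcf_zero (n : Nat) : Mcf n 0 = List.replicate n 0 := by
  apply List.ext_getElem
  · simp [Mcf]
  · intro k hk hk'
    simp only [length_Mcf] at hk
    simp [Mcf]

theorem Rcf_zero (n : Nat) : Rcf n 0 = List.replicate n 0 := by
  apply List.ext_getElem
  · simp [Rcf]
  · intro k hk hk'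
    simp only [length_Rcf] at hk
    simp [Rcf]
    omega

theorem pyIncrAt_zero_cons (x : Int) (xs : List Int) :
    pyIncrAt (x :: xs) 0 = (x + 1) :: xs := by
  unfold pyIncrAt
  rw [PySem.List.pySetD_of_nonneg _ _ (by norm_num)]
  simp [PySem.List.pyGetD_zero_cons]

theorem Rcf_cons (n : Nat) (t : Int) (hn : 1 ≤ n) :
    Rcf n t = (max 0 (min 9 (t - 9 * ((n : Int) - 1)))) :: (Mcf (n - 1) t).reverse := by
  apply List.ext_getElem
  · simp [Rcf, Mcf]
    omega
  · intro k hk hk'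
    simp only [length_Rcf] at hk
    rcases Nat.eq_zero_or_pos k with hk0 | hkpos
    · subst hk0
      simp [Rcf, Mcf]
    · obtain ⟨k', rfl⟩ : ∃ k', k = k' + 1 := ⟨k - 1, by omega⟩
      simp only [Rcf, Mcf, List.getElem_cons_succ, List.getElem_reverse,
        List.getElem_map, List.getElem_range, List.length_map, List.length_range]
      congr 3
      omega

-- unfolding equations for A's loops (the `let`s zeta-reduced)
theorem maxLoop_succ (s2 : Nat) (maxi : List Int) (i2 : Int) :
    maxLoop (s2 + 1) maxi i2 =
      (if PySem.List.pyGetD maxi i2 0 = 9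
        then maxLoop s2 (pyIncrAt maxi (i2 + 1)) (i2 + 1)
        else maxLoop s2 (pyIncrAt maxi i2) i2) := by
  rw [maxLoop]
  by_cases h : PySem.List.pyGetD maxi i2 0 = 9 <;> simp [h]

theorem minLoop_one (mini : List Int) (i1 : Int) :
    minLoop 1 mini i1 =
      (if PySem.List.pyGetD mini 0 0 = 0 then pyIncrAt mini 0
       else pyIncrAt mini (if PySem.List.pyGetD mini i1 0 = 9 then i1 - 1 else i1)) := by
  rw [minLoop]
  by_cases h : PySem.List.pyGetD mini i1 0 = 9 <;> simp [h]

theorem minLoop_succ2 (s1 : Nat) (mini : List Int) (i1 : Int) :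
    minLoop (s1 + 2) mini i1 =
      minLoop (s1 + 1)
        (pyIncrAt mini (if PySem.List.pyGetD mini i1 0 = 9 then i1 - 1 else i1))
        (if PySem.List.pyGetD mini i1 0 = 9 then i1 - 1 else i1) := by
  rw [minLoop]
  by_cases h : PySem.List.pyGetD mini i1 0 = 9 <;> simp [h]

-- A's max loop, run for k steps from the greedy state for t, lands on the greedy state for t + k
theorem maxLoop_eq (k : Nat) : ∀ (n : Nat) (t i2 : Int), 0 ≤ i2 → 9 * i2 ≤ t →
    t ≤ 9 * i2 + 9 → t + k ≤ 9 * n → maxLoop k (Mcf n t) i2 = Mcf n (t + k) := by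
  induction k with
  | zero => intro n t i2 _ _ _ _; simp [maxLoop]
  | succ k ih =>
    intro n t i2 h0 h1 h2 h3
    have hin : i2 < (n : Int) := by omega
    rw [maxLoop_succ, Mcf_get n t i2 h0 hin]
    by_cases h9 : max 0 (min 9 (t - 9 * i2)) = (9 : Int)
    · rw [if_pos h9, ← Mcf_succ_set n t (i2 + 1) (by omega) (by omega) (by omega) (by omega),
        ih n (t + 1) (i2 + 1) (by omega) (by omega) (by omega) (by omega)]
      congr 1
      push_cast
      omega
    · rw [if_neg h9, ← Mcf_succ_set n t i2 h0 hin h1 (by omega),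
        ih n (t + 1) i2 h0 (by omega) (by omega) (by omega)]
      congr 1
      push_cast
      omega

-- A's min loop, run with fuel k ≥ 1 from the right-greedy state for t, finishes on Fcf n (t + k)
theorem minLoop_eq (k : Nat) : ∀ (n : Nat) (t i1 : Int), 1 ≤ k → 0 ≤ i1 → i1 ≤ (n : Int) - 1 →
    9 * ((n : Int) - 1 - i1) ≤ t → t ≤ 9 * ((n : Int) - 1 - i1) + 9 → t + k ≤ 9 * n →
    minLoop k (Rcf n t) i1 = Fcf n (t + k) := by
  induction k with
  | zero => intro n t i1 h; omega
  | succ k ih =>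
    intro n t i1 _ h0 hub h1 h2 h3
    have hn1 : 1 ≤ n := by omega
    have ht0 : 0 ≤ t := by omega
    have hR0 : PySem.List.pyGetD (Rcf n t) 0 0 = max 0 (min 9 (t - 9 * ((n : Int) - 1))) := by
      have h := Rcf_get n t 0 (by omega) (by omega)
      simpa using h
    rcases Nat.eq_zero_or_pos k with hk0 | hkpos
    · -- last unit: whichever branch fires, position 0 is incremented
      subst hk0
      have hle : t ≤ 9 * ((n : Int) - 1) + 8 := by omega
      have hres : Fcf n (t + 1) = pyIncrAt (Rcf n t) 0 := by
        have htt : t + 1 - 1 = t := by ring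
        rw [Rcf_cons n t hn1, pyIncrAt_zero_cons]
        unfold Fcf
        rw [htt]
        simp only [List.cons.injEq]
        exact ⟨by omega, trivial⟩
      rw [minLoop_one]
      by_cases hz : PySem.List.pyGetD (Rcf n t) 0 0 = (0 : Int)
      · rw [if_pos hz]
        exact hres.symm
      · -- mini[0] ≠ 0: every other position is a full 9, so i1 = 0 and no pointer adjustment fires
        rw [hR0] at hz
        have hgt : 9 * ((n : Int) - 1) < t := by omega
        have hi10 : i1 = 0 := by omega
        subst hi10
        have hnot9 : PySem.List.pyGetD (Rcf n t) 0 0 ≠ (9 : Int) := by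
          rw [hR0]; omega
        rw [if_neg (by rw [hR0]; omega), if_neg hnot9]
        exact hres.symm
    · -- plain greedy step, then recurse
      obtain ⟨k', rfl⟩ : ∃ k', k = k' + 1 := ⟨k - 1, by omega⟩
      rw [minLoop_succ2, Rcf_get n t i1 h0 (by omega)]
      by_cases h9 : max 0 (min 9 (t - 9 * ((n : Int) - 1 - i1))) = (9 : Int)
      · have ht : t = 9 * ((n : Int) - 1 - i1) + 9 := by omega
        have hi1pos : 1 ≤ i1 := by omega
        rw [if_pos h9,
          ← Rcf_succ_set n t (i1 - 1) (by omega) (by omega) (by omega) (by omega),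
          ih n (t + 1) (i1 - 1) (by omega) (by omega) (by omega) (by omega) (by omega) (by omega)]
        congr 1
        push_cast
        omega
      · have ht : t ≤ 9 * ((n : Int) - 1 - i1) + 8 := by omega
        rw [if_neg h9, ← Rcf_succ_set n t i1 h0 hub h1 ht,
          ih n (t + 1) i1 (by omega) h0 hub (by omega) (by omega) (by omega)]
        congr 1
        push_cast
        omega

-- Mcf unfolds as a cons: the first slot takes min 9 t, the rest is the greedy list for the remainder
theorem Mcf_cons (n : Nat) (t : Int) (ht : 0 ≤ t) :
    Mcf (n + 1) t = min 9 t :: Mcf n (t - min 9 t) := by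
  apply List.ext_getElem
  · simp [Mcf]
  · intro k hk hk'
    simp only [length_Mcf] at hk
    rcases Nat.eq_zero_or_pos k with hk0 | hkpos
    · subst hk0
      simp [Mcf]
      omega
    · obtain ⟨k', rfl⟩ : ∃ k', k = k' + 1 := ⟨k - 1, by omega⟩
      simp only [Mcf, List.getElem_map, List.getElem_range, List.getElem_cons_succ]
      push_cast
      omega

-- Source B's greedy pass with an arbitrary accumulator
theorem greedyB_def (n : Nat) (t : Int) :
    greedyB n t = (List.range n).foldl (fun ar _ => (ar.1 ++ [min 9 ar.2], ar.2 - min 9 ar.2)) ([], t) := rfl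

theorem greedyB_acc (n : Nat) : ∀ (acc : List Int) (t : Int),
    (List.range n).foldl (fun ar _ => (ar.1 ++ [min 9 ar.2], ar.2 - min 9 ar.2)) (acc, t)
      = (acc ++ ((List.range n).foldl (fun ar _ => (ar.1 ++ [min 9 ar.2], ar.2 - min 9 ar.2)) ([], t)).1,
         ((List.range n).foldl (fun ar _ => (ar.1 ++ [min 9 ar.2], ar.2 - min 9 ar.2)) ([], t)).2) := by
  induction n with
  | zero => intro acc t; simp
  | succ n ih =>
    intro acc t
    rw [List.range_succ_eq_map]
    simp only [List.foldl_cons, List.foldl_map, List.nil_append]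
    rw [ih (acc ++ [min 9 t]) (t - min 9 t), ih [min 9 t] (t - min 9 t)]
    simp

-- Source B's greedy pass computes the closed form and leftover max 0 (t - 9n)
theorem greedyB_eq (n : Nat) : ∀ (t : Int), 0 ≤ t →
    greedyB n t = (Mcf n t, max 0 (t - 9 * n)) := by
  induction n with
  | zero => intro t ht; simp [greedyB, Mcf]; omega
  | succ n ih =>
    intro t ht
    rw [greedyB_def, List.range_succ_eq_map]
    simp only [List.foldl_cons, List.foldl_map, List.nil_append]
    rw [greedyB_acc n [min 9 t] (t - min 9 t), ← greedyB_def n (t - min 9 t),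
      ih (t - min 9 t) (by omega), Mcf_cons n t ht]
    rw [Prod.mk.injEq]
    exact ⟨rfl, by push_cast; omega⟩

-- ===== VERDICT (by name: the statement is the Claim_ definition above) =====
theorem f_spec : Claim_equal_f := by
  intro m s _
  unfold Spec_f f f_alt
  by_cases h1 : m = 1 ∧ s = 0
  · simp [h1]
  · rw [if_neg h1, if_neg h1]
    by_cases h2 : 1 ≤ s ∧ s ≤ m * 9
    · rw [if_neg (not_not_intro h2), if_neg (not_not_intro h2)]
      obtain ⟨hs1, hs2⟩ := h2
      have hm : 1 ≤ m := by nlinarith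
      have hmn : ((m.toNat : Int)) = m := by omega
      have hsn : ((s.toNat : Int)) = s := by omega
      have hn1 : 1 ≤ m.toNat := by omega
      have hm1 : (m - 1).toNat = m.toNat - 1 := by omega
      have hmax : maxLoop s.toNat (List.replicate m.toNat 0) 0 = Mcf m.toNat s := by
        rw [← Mcf_zero]
        rw [maxLoop_eq s.toNat m.toNat 0 0 le_rfl (by omega) (by omega) (by omega)]
        congr 1
        omega
      have hmaxB : (greedyB m.toNat s).1 = Mcf m.toNat s := by
        rw [greedyB_eq m.toNat s (by omega)]
      have hmin : minLoop s.toNat (List.replicate m.toNat 0) (m - 1) = Fcf m.toNat s := by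
        rw [← Rcf_zero]
        rw [minLoop_eq s.toNat m.toNat 0 (m - 1) (by omega) (by omega) (by omega) (by omega)
          (by omega) (by omega)]
        congr 1
        omega
      have hminB : (1 + (greedyB (m - 1).toNat (s - 1)).2) :: (greedyB (m - 1).toNat (s - 1)).1.reverse
          = Fcf m.toNat s := by
        rw [hm1, greedyB_eq (m.toNat - 1) (s - 1) (by omega)]
        unfold Fcf
        have hcast : (((m.toNat - 1 : Nat) : Int)) = (m.toNat : Int) - 1 := by omega
        rw [hcast]
      simp only [hmax, hmaxB, hmin, hminB]
    · rw [if_pos h2, if_pos h2]
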